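-- pv_equiv track=rewrite | github.com/Ahmedgito/dr_doctor_backend | dr_doctor_scraper/scrapers/marham/multi_threaded_scraper.py | _distribute_work
-- ===== SOURCE A (Python) =====
-- from typing import Dict, List, Optional
--
-- def _distribute_work(items: List, num_workers: int) -> List[List]:
--     """Distribute items evenly across workers.
--
--     Args:
--         items: List of items to distribute
--         num_workers: Number of workers
--
--     Returns:
--         List of lists, one per worker
--     """
--     if not items:
--         return []
--
--     chunk_size = max(1, len(items) // num_workers)
--     chunks = []
--     for i in range(0, len(items), chunk_size):
--         chunks.append(items[i:i + chunk_size])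
--
--     # Ensure we have exactly num_workers chunks (pad with empty lists if needed)
--     while len(chunks) < num_workers:
--         chunks.append([])
--
--     return chunks[:num_workers]
-- ===== SOURCE B (Python) =====
-- def _distribute_work(items, num_workers):
--     """Distribute items evenly across workers: one pass scattering each item
--     into a pre-allocated per-worker bucket chosen by its index."""
--     if not items:
--         return []
--     chunk_size = max(1, len(items) // num_workers)
--     buckets = [[] for _ in range(num_workers)]
--     for idx, item in enumerate(items):
--         w = idx // chunk_size
--         if w >= num_workers:
--             break
--         buckets[w].append(item)
--     return buckets
-- ===== Notes on version B (the rewrite author's own statement) =====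
-- stated objective: alternative
-- what changed: A builds fixed-size slices by striding over start indices, then pads with empty lists and truncates to num_workers; B pre-allocates num_workers empty buckets and makes one pass over the items, scattering each item into the bucket idx//chunk_size (breaking once that index runs past the workers), so no slicing, padding or truncation occurs.
-- outside the precondition, e.g. on _distribute_work([1, 2, 3], -1): A returns [[1], [2]], B returns []; on _distribute_work([1], 0): A raises ZeroDivisionError, B raises ZeroDivisionError
import Mathlib
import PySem

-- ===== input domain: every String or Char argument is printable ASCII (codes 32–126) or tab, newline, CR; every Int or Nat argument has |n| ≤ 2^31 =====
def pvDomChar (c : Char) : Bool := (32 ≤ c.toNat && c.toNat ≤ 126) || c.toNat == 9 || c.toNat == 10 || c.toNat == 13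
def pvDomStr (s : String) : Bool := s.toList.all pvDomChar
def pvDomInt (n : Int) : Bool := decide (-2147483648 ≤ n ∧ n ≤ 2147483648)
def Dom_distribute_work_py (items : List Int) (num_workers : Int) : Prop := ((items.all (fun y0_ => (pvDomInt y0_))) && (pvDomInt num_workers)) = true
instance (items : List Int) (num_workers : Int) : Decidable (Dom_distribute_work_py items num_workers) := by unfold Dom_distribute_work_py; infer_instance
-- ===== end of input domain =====

-- B replaces A's stride-slicing + while-pad + truncation by a one-pass scatter of each item into a pre-allocated per-worker bucket (alternative decomposition; same cost; return-value equivalence on num_workers ≥ 1 or empty items).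


-- ===== PORT A =====
-- 'while len(chunks) < num_workers: chunks.append([])'
def pvPadWhile (nw : Int) (chunks : List (List Int)) : List (List Int) :=
  if (chunks.length : Int) < nw then pvPadWhile nw (chunks ++ [([] : List Int)])
  else chunks
termination_by (nw - chunks.length).toNat
decreasing_by simp; omega

def distribute_work_py (items : List Int) (num_workers : Int) : List (List Int) :=
  if items = [] then []
  else
    let chunk_size : Int := max 1 (PySem.Int.floordiv (items.length : Int) num_workers)
    let chunks : List (List Int) :=
      (PySem.List.pyRange 0 (items.length : Int) chunk_size).foldl
        (fun acc i => acc ++ [PySem.List.slice items (some i) (some (i + chunk_size))]) []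
    PySem.List.slice (pvPadWhile num_workers chunks) none (some num_workers)

-- ===== PORT B =====
-- 'for idx, item in enumerate(items): w = idx // chunk_size; if w >= num_workers: break; buckets[w].append(item)'
def pvFill (nw cs : Int) : List (Int × Int) → List (List Int) → List (List Int)
  | [], buckets => buckets
  | (idx, x) :: rest, buckets =>
      let w := PySem.Int.floordiv idx cs
      if nw ≤ w then buckets
      else pvFill nw cs rest (buckets.modify w.toNat (· ++ [x]))

def distribute_work_py_alt (items : List Int) (num_workers : Int) : List (List Int) :=
  if items = [] then []
  else
    let chunk_size : Int := max 1 (PySem.Int.floordiv (items.length : Int) num_workers)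
    let buckets : List (List Int) := (PySem.List.pyRange 0 num_workers 1).map (fun _ => ([] : List Int))
    pvFill num_workers chunk_size (PySem.List.enumerate items 0) buckets

-- ===== PRECONDITION & SPEC =====
-- Pre_ excludes non-positive num_workers with non-empty items: num_workers = 0 raises
-- ZeroDivisionError (in both A and B), and a negative worker count lies outside the task's
-- natural domain — A's value there (chunk size clamped to 1, then negative-slice truncation)
-- and B's empty result are both accidents of the respective formulations.
def Pre_distribute_work_py (items : List Int) (num_workers : Int) : Prop :=
  items = [] ∨ 1 ≤ num_workers
instance (items : List Int) (num_workers : Int) : Decidable (Pre_distribute_work_py items num_workers) := by unfold Pre_distribute_work_py; infer_instance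

def pvWitness_distribute_work_py : List Int × Int := ([1, 2, 3, 4, 5], 2)

def Spec_distribute_work_py (items : List Int) (num_workers : Int) (out : List (List Int)) : Prop := out = distribute_work_py_alt items num_workers
instance (items : List Int) (num_workers : Int) (out : List (List Int)) : Decidable (Spec_distribute_work_py items num_workers out) := by unfold Spec_distribute_work_py; infer_instance

-- ===== CLAIM (what is proved, stated in full; the proofs are below) =====
def Claim_equal_distribute_work_py : Prop := ∀ (items : List Int) (num_workers : Int), Dom_distribute_work_py items num_workers → Pre_distribute_work_py items num_workers → Spec_distribute_work_py items num_workers (distribute_work_py items num_workers)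

-- ===== LEMMAS AND PROOFS =====

-- The while-pad loop appends exactly enough empty lists to reach num_workers entries.
lemma pvPadWhile_eq (nw : Int) : ∀ (m : Nat) (L : List (List Int)),
    nw.toNat - L.length = m → pvPadWhile nw L = L ++ List.replicate (nw.toNat - L.length) [] := by
  intro m
  induction m with
  | zero =>
      intro L hm
      rw [pvPadWhile]
      have : ¬ ((L.length : Int) < nw) := by omega
      simp [this, hm]
  | succ m ih =>
      intro L hm
      rw [pvPadWhile]
      by_cases h : (L.length : Int) < nw
      · have h1 : nw.toNat - (L ++ [([] : List Int)]).length = m := by simp; omega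
        rw [if_pos h, ih _ h1]
        have h2 : nw.toNat - L.length = (nw.toNat - (L.length + 1)) + 1 := by omega
        simp [h2, List.replicate_succ]
      · omega

-- Truncating the padded chunk list is the map over all worker indices, once F vanishes past k.
lemma pvTakePad (F : Nat → List Int) (k w : Nat) (h : ∀ j, k ≤ j → F j = []) :
    ((List.range k).map F ++ List.replicate (w - k) ([] : List Int)).take w
      = (List.range w).map F := by
  by_cases hw : w ≤ k
  · have : w - k = 0 := by omega
    rw [this]
    simp [← List.map_take, List.take_range, Nat.min_eq_left hw]
  · have hk : k ≤ w := by omega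
    have hsplit : w = k + (w - k) := by omega
    rw [List.take_of_length_le (by simp; omega)]
    conv_rhs => rw [hsplit]
    rw [List.range_add, List.map_append]
    congr 1
    rw [List.map_map]
    have : ∀ i ∈ List.range (w - k), (F ∘ fun i => k + i) i = [] := by
      intro i _; exact h (k + i) (Nat.le_add_right k i)
    rw [List.map_congr_left this]
    simp [List.map_const']

-- The scatter loop's invariant: with the first m items already placed, processing the
-- remaining suffix fills every bucket j with its full slice (L.drop (c'*j)).take c'.
lemma pvFill_inv (L : List Int) (nw : Int) (c' : Nat) (hc : 0 < c') :
    ∀ (suf : List Int) (m : Nat), L.drop m = suf →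
    pvFill nw (c' : Int) (PySem.List.enumerate suf (m : Int))
      ((List.range nw.toNat).map (fun j => (L.drop (c' * j)).take (min c' (m - c' * j))))
      = (List.range nw.toNat).map (fun j => (L.drop (c' * j)).take c') := by
  intro suf
  induction suf with
  | nil =>
      intro m hm
      simp only [PySem.List.enumerate_nil, pvFill]
      apply List.map_congr_left
      intro j _
      have hlen : L.length ≤ m := by
        have := congrArg List.length hm; simp at this; omega
      have hdl : (L.drop (c' * j)).length ≤ m - c' * j := by simp; omega
      by_cases h : c' ≤ m - c' * j
      · rw [Nat.min_eq_left h]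
      · rw [Nat.min_eq_right (by omega), List.take_of_length_le hdl,
            List.take_of_length_le (le_trans hdl (by omega))]
  | cons x rest ih =>
      intro m hm
      have hmlt : m < L.length := by
        by_contra h
        rw [List.drop_eq_nil_of_le (by omega)] at hm
        exact List.cons_ne_nil x rest hm.symm
      have hD := List.drop_eq_getElem_cons hmlt
      rw [hm, List.cons.injEq] at hD
      have hx : L[m]'hmlt = x := hD.1.symm
      have hrest : L.drop (m + 1) = rest := hD.2.symm
      have hdm := Nat.div_add_mod m c'
      have hmod := Nat.mod_lt m hc
      rw [PySem.List.enumerate_cons]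
      simp only [pvFill, PySem.Int.floordiv_natCast, Int.toNat_natCast]
      by_cases hbr : nw ≤ ((m / c' : Nat) : Int)
      · -- break: every bucket is already full
        rw [if_pos hbr]
        apply List.map_congr_left
        intro j hj
        rw [List.mem_range] at hj
        have h1 : c' * (j + 1) ≤ c' * (m / c') :=
          Nat.mul_le_mul_left c' (by omega)
        have h2 : c' * (j + 1) = c' * j + c' := by ring
        rw [Nat.min_eq_left (by omega)]
      · rw [if_neg hbr]
        have hwk : m / c' < nw.toNat := by omega
        have hstep :
            ((List.range nw.toNat).map (fun j => (L.drop (c' * j)).take (min c' (m - c' * j)))).modify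
              (m / c') (· ++ [x])
            = (List.range nw.toNat).map (fun j => (L.drop (c' * j)).take (min c' (m + 1 - c' * j))) := by
          apply List.ext_getElem (by simp)
          intro j h1 h2
          have hj : j < nw.toNat := by simpa using h2
          rw [List.getElem_modify]
          simp only [List.getElem_map, List.getElem_range]
          by_cases hjw : m / c' = j
          · subst hjw
            rw [if_pos rfl]
            set t := m - c' * (m / c') with ht
            have htc : t < c' := by omega
            have htl : t < (L.drop (c' * (m / c'))).length := by simp; omega
            rw [Nat.min_eq_right (by omega), Nat.min_eq_right (by omega)]
            have : m + 1 - c' * (m / c') = t + 1 := by omega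
            rw [this, List.take_add_one]
            have : (L.drop (c' * (m / c')))[t]? = some x := by
              rw [List.getElem?_eq_getElem htl, List.getElem_drop]
              congr 1
              rw [← hx]; congr 1; omega
            rw [this]; rfl
          · rw [if_neg hjw]
            by_cases hlt : j < m / c'
            · have h1 : c' * (j + 1) ≤ c' * (m / c') := Nat.mul_le_mul_left c' (by omega)
              have h2 : c' * (j + 1) = c' * j + c' := by ring
              rw [Nat.min_eq_left (by omega), Nat.min_eq_left (by omega)]
            · have hgt : m / c' < j := by omega
              have h1 : c' * (m / c' + 1) ≤ c' * j := Nat.mul_le_mul_left c' (by omega)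
              have h2 : c' * (m / c' + 1) = c' * (m / c') + c' := by ring
              have h3 : m < c' * j := by omega
              rw [Nat.min_eq_right (by omega), Nat.min_eq_right (by omega)]
              have h1 : m - c' * j = 0 := by omega
              have h2 : m + 1 - c' * j = 0 := by omega
              rw [h1, h2]
        rw [hstep]
        have : ((m : Int) + 1) = ((m + 1 : Nat) : Int) := by push_cast; ring
        rw [this]
        exact ih (m + 1) hrest

theorem distribute_work_py_spec_aux (items : List Int) (num_workers : Int)
    (hpre : Pre_distribute_work_py items num_workers) :
    distribute_work_py items num_workers = distribute_work_py_alt items num_workers := by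
  by_cases hnil : items = []
  · simp [distribute_work_py, distribute_work_py_alt, hnil]
  · have hw : 1 ≤ num_workers := hpre.resolve_left hnil
    have hn0 : 0 < (items.length : Int) := by
      have := List.length_pos_iff.mpr hnil; omega
    simp only [distribute_work_py, distribute_work_py_alt, if_neg hnil]
    set n : Int := (items.length : Int) with hn_def
    set c : Int := max 1 (PySem.Int.floordiv n num_workers) with hc_def
    have hn : 0 < n := hn0
    have hc : 0 < c := by omega
    set c' : Nat := c.toNat with hc'_def
    have hcc : c = (c' : Int) := by omega
    have hc'0 : 0 < c' := by omega
    set F : Nat → List Int := fun j => (items.drop (c' * j)).take c' with hF_def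
    set K : Nat := ((n - 0 + c - 1) / c).toNat with hK_def
    -- ceiling property: c' * K ≥ items.length
    have hKc : items.length ≤ c' * K := by
      have h1 := Int.mul_ediv_add_emod (n - 0 + c - 1) c
      have h2 := Int.emod_lt_of_pos (n - 0 + c - 1) hc
      have h3 := Int.emod_nonneg (n - 0 + c - 1) (by omega : c ≠ 0)
      have h4 : 0 ≤ (n - 0 + c - 1) / c := Int.ediv_nonneg (by omega) (by omega)
      have h5 : ((c' : Int)) * (K : Int) = c * ((n - 0 + c - 1) / c) := by
        rw [← hcc, hK_def, Int.toNat_of_nonneg h4]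
      have : n ≤ (c' : Int) * (K : Int) := by rw [h5]; nlinarith
      omega
    have hFzero : ∀ j, K ≤ j → F j = [] := by
      intro j hj
      have : items.length ≤ c' * j := le_trans hKc (Nat.mul_le_mul_left _ hj)
      simp [hF_def, List.drop_eq_nil_of_le this]
    -- A's chunks list
    rw [PySem.List.foldl_append_singleton_eq_map, List.nil_append,
        PySem.List.pyRange_of_pos 0 n hc, if_pos (by omega : (0:Int) < n), List.map_map]
    have hA : ((fun i => PySem.List.slice items (some i) (some (i + c))) ∘ fun k : Nat => 0 + c * (k : Int))
        = F := by
      funext j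
      have e1 : 0 + c * (j : Int) = ((c' * j : Nat) : Int) := by rw [hcc]; push_cast; ring
      show PySem.List.slice items (some (0 + c * (j : Int))) (some (0 + c * (j : Int) + c)) = F j
      rw [e1, hcc, PySem.List.slice_natCast_add]
    rw [hA, ← hK_def]
    -- B's buckets: empty at start, full after the scatter pass
    have hB0 : (PySem.List.pyRange 0 num_workers 1).map (fun _ => ([] : List Int))
        = (List.range num_workers.toNat).map
            (fun j => (items.drop (c' * j)).take (min c' (0 - c' * j))) := by
      rw [PySem.List.pyRange_one, List.map_map]
      simp only [Function.comp_def]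
      simp [List.map_const']
    have hFill := pvFill_inv items num_workers c' hc'0 items 0 (by simp)
    simp only [Nat.cast_zero] at hFill
    rw [hB0, hcc, hFill]
    -- pad then truncate A's chunks
    rw [pvPadWhile_eq num_workers (num_workers.toNat - ((List.range K).map F).length) _ rfl,
        PySem.List.slice_to _ (by omega : (0:Int) ≤ num_workers)]
    simpa using pvTakePad F K num_workers.toNat hFzero

-- ===== VERDICT (by name: the statement is the Claim_ definition above) =====
theorem distribute_work_py_spec : Claim_equal_distribute_work_py := by
  intro items num_workers _ hpre
  exact distribute_work_py_spec_aux items num_workers hpre
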